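-- pv_equiv track=rewrite | github.com/abdulmorve87/ai-api-generator | scraping_layer/examples/ai_script_generator.py | _analyze_user_requirements
-- ===== SOURCE A (Python) =====
-- from typing import Dict, List, Any, Optional, Tuple
--
-- def _analyze_user_requirements(form_data: Dict[str, Any]) -> Dict[str, Any]:
--     """
--     Analyze user's data description to understand what they want.
--     In a real AI system, this would use NLP to extract intent.
--     """
--     description = form_data.get('data_description', '').lower()
--
--     # Simple keyword-based analysis (real AI would be more sophisticated)
--     data_type = "general"
--     domain = "web"
--
--     if any(keyword in description for keyword in ['ipo', 'initial public offering', 'grey market']):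
--         data_type = "ipo"
--         domain = "finance"
--     elif any(keyword in description for keyword in ['stock', 'share', 'equity']):
--         data_type = "stock"
--         domain = "finance"
--     elif any(keyword in description for keyword in ['news', 'article', 'headline']):
--         data_type = "news"
--         domain = "media"
--     elif any(keyword in description for keyword in ['product', 'price', 'ecommerce']):
--         data_type = "product"
--         domain = "ecommerce"
--
--     return {
--         "data_type": data_type,
--         "domain": domain,
--         "description": description,
--         "complexity": "medium"  # Would be determined by AI analysis
--     }
-- ===== SOURCE B (Python) =====
-- # Inverted keyword->priority index: score every keyword hit, pick the minimal
-- # priority (no ordered first-match scan over rule groups).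
--
-- KEYWORD_PRIORITY = {
--     "ipo": 0, "initial public offering": 0, "grey market": 0,
--     "stock": 1, "share": 1, "equity": 1,
--     "news": 2, "article": 2, "headline": 2,
--     "product": 3, "price": 3, "ecommerce": 3,
-- }
--
-- OUTCOMES = [("ipo", "finance"), ("stock", "finance"),
--             ("news", "media"), ("product", "ecommerce")]
--
--
-- def _analyze_user_requirements(form_data):
--     description = form_data.get('data_description', '').lower()
--     hits = [p for k, p in KEYWORD_PRIORITY.items() if k in description]
--     data_type, domain = OUTCOMES[min(hits)] if hits else ("general", "web")
--     return {
--         "data_type": data_type,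
--         "domain": domain,
--         "description": description,
--         "complexity": "medium",
--     }
-- ===== Notes on version B (the rewrite author's own statement) =====
-- stated objective: alternative
-- what changed: Replaced the ordered if/elif first-match chain by an inverted keyword-to-priority index: every keyword is tested unconditionally, the matched priorities are collected, and the outcome with the minimal priority wins (correct because the chain's rule order equals the priority order).
import Mathlib
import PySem

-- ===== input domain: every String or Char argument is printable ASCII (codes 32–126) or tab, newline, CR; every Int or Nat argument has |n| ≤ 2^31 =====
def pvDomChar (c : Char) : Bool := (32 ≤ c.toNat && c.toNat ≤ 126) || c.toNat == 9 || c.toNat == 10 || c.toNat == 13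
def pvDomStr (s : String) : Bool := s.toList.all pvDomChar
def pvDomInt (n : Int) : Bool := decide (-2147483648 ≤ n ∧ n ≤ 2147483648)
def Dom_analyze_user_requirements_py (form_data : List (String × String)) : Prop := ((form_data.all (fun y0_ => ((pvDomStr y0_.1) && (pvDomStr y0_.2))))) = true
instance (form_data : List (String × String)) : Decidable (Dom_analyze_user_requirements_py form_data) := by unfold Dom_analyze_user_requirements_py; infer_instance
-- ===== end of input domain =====

-- B replaces A's ordered if/elif first-match chain by an inverted keyword→priority index
-- scored by the minimal matched priority (alternative decomposition, same cost).

-- ===== PORT A =====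
def analyze_user_requirements_py (form_data : List (String × String)) : List (String × String) :=
  let description := PySem.Str.lower ((PySem.Dict.ofList form_data).getD "data_description" "")
  let dt_dom : String × String :=
    if ["ipo", "initial public offering", "grey market"].any (fun k => PySem.Str.isIn k description) then
      ("ipo", "finance")
    else if ["stock", "share", "equity"].any (fun k => PySem.Str.isIn k description) then
      ("stock", "finance")
    else if ["news", "article", "headline"].any (fun k => PySem.Str.isIn k description) then
      ("news", "media")
    else if ["product", "price", "ecommerce"].any (fun k => PySem.Str.isIn k description) then
      ("product", "ecommerce")
    else ("general", "web")
  [("data_type", dt_dom.1), ("domain", dt_dom.2), ("description", description), ("complexity", "medium")]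

-- ===== PORT B =====
-- the KEYWORD_PRIORITY dict of Source B (insertion order; all keys distinct)
def pvKeywordPriority : List (String × Nat) :=
  [("ipo", 0), ("initial public offering", 0), ("grey market", 0),
   ("stock", 1), ("share", 1), ("equity", 1),
   ("news", 2), ("article", 2), ("headline", 2),
   ("product", 3), ("price", 3), ("ecommerce", 3)]

-- the OUTCOMES table of Source B
def pvOutcomes : List (String × String) :=
  [("ipo", "finance"), ("stock", "finance"), ("news", "media"), ("product", "ecommerce")]

def analyze_user_requirements_py_alt (form_data : List (String × String)) : List (String × String) :=
  let description := PySem.Str.lower ((PySem.Dict.ofList form_data).getD "data_description" "")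
  let hits := pvKeywordPriority.filterMap
    (fun kp => if PySem.Str.isIn kp.1 description then some kp.2 else none)
  -- OUTCOMES[min(hits)] when hits is nonempty: every priority is 0..3, so List.getD is exact here
  let dt_dom : String × String :=
    match hits.min? with
    | some p => pvOutcomes.getD p ("general", "web")
    | none => ("general", "web")
  [("data_type", dt_dom.1), ("domain", dt_dom.2), ("description", description), ("complexity", "medium")]

-- ===== PRECONDITION & SPEC =====
def Spec_analyze_user_requirements_py (form_data : List (String × String)) (out : List (String × String)) : Prop := out = analyze_user_requirements_py_alt form_data
instance (form_data : List (String × String)) (out : List (String × String)) : Decidable (Spec_analyze_user_requirements_py form_data out) := by unfold Spec_analyze_user_requirements_py; infer_instance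

-- ===== CLAIM (what is proved, stated in full; the proofs are below) =====
def Claim_equal_analyze_user_requirements_py : Prop := ∀ (form_data : List (String × String)), Dom_analyze_user_requirements_py form_data → Spec_analyze_user_requirements_py form_data (analyze_user_requirements_py form_data)

-- ===== LEMMAS AND PROOFS =====

-- a 3-keyword block of the index: its filterMap yields only its own priority,
-- and is empty exactly when none of the block's keywords matches
theorem pvGroup_block (m : String → Bool) (k1 k2 k3 : String) (i : Nat) :
    (∀ x ∈ ([(k1, i), (k2, i), (k3, i)] : List (String × Nat)).filterMap
        (fun kp => if m kp.1 then some kp.2 else none), x = i)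
    ∧ ((([(k1, i), (k2, i), (k3, i)] : List (String × Nat)).filterMap
        (fun kp => if m kp.1 then some kp.2 else none)) = [] ↔ ([k1, k2, k3].any m) = false) := by
  cases h1 : m k1 <;> cases h2 : m k2 <;> cases h3 : m k3 <;>
    simp [List.filterMap, h1, h2, h3]

-- minimum of four constant blocks = index of the first nonempty block
theorem pvMin_blocks (l0 l1 l2 l3 : List Nat)
    (h0 : ∀ x ∈ l0, x = 0) (h1 : ∀ x ∈ l1, x = 1)
    (h2 : ∀ x ∈ l2, x = 2) (h3 : ∀ x ∈ l3, x = 3) :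
    (l0 ++ l1 ++ l2 ++ l3).min? =
      if l0 ≠ [] then some 0 else if l1 ≠ [] then some 1
      else if l2 ≠ [] then some 2 else if l3 ≠ [] then some 3 else none := by
  split_ifs with e0 e1 e2 e3
  · obtain ⟨x, hx⟩ := List.exists_mem_of_ne_nil l0 e0
    have hx0 : (0 : Nat) ∈ l0 := by have := h0 x hx; rwa [this] at hx
    rw [List.min?_eq_some_iff]
    exact ⟨by simp [List.mem_append]; tauto, fun b _ => Nat.zero_le b⟩
  · rw [not_ne_iff] at e0; subst e0
    obtain ⟨x, hx⟩ := List.exists_mem_of_ne_nil l1 e1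
    have hx1 : (1 : Nat) ∈ l1 := by have := h1 x hx; rwa [this] at hx
    rw [List.min?_eq_some_iff]
    refine ⟨by simp [List.mem_append]; tauto, fun b hb => ?_⟩
    simp [List.mem_append] at hb
    rcases hb with h | h | h
    · exact le_of_eq (h1 b h).symm
    · have := h2 b h; omega
    · have := h3 b h; omega
  · rw [not_ne_iff] at e0 e1; subst e0; subst e1
    obtain ⟨x, hx⟩ := List.exists_mem_of_ne_nil l2 e2
    have hx2 : (2 : Nat) ∈ l2 := by have := h2 x hx; rwa [this] at hx
    rw [List.min?_eq_some_iff]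
    refine ⟨by simp [List.mem_append]; tauto, fun b hb => ?_⟩
    simp [List.mem_append] at hb
    rcases hb with h | h
    · exact le_of_eq (h2 b h).symm
    · have := h3 b h; omega
  · rw [not_ne_iff] at e0 e1 e2; subst e0; subst e1; subst e2
    obtain ⟨x, hx⟩ := List.exists_mem_of_ne_nil l3 e3
    have hx3 : (3 : Nat) ∈ l3 := by have := h3 x hx; rwa [this] at hx
    rw [List.min?_eq_some_iff]
    refine ⟨by simpa using hx3, fun b hb => ?_⟩
    simp at hb
    exact le_of_eq (h3 b hb).symm
  · rw [not_ne_iff] at e0 e1 e2 e3; subst e0; subst e1; subst e2; subst e3; rfl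

-- B's min-priority selection equals A's if/elif chain
theorem pvSelect_eq (description : String) :
    (match (pvKeywordPriority.filterMap
        (fun kp => if PySem.Str.isIn kp.1 description then some kp.2 else none)).min? with
     | some p => pvOutcomes.getD p ("general", "web")
     | none => (("general", "web") : String × String))
    = (if ["ipo", "initial public offering", "grey market"].any (fun k => PySem.Str.isIn k description) then
        (("ipo", "finance") : String × String)
      else if ["stock", "share", "equity"].any (fun k => PySem.Str.isIn k description) then
        ("stock", "finance")
      else if ["news", "article", "headline"].any (fun k => PySem.Str.isIn k description) then
        ("news", "media")
      else if ["product", "price", "ecommerce"].any (fun k => PySem.Str.isIn k description) then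
        ("product", "ecommerce")
      else ("general", "web")) := by
  have b0 := pvGroup_block (fun k => PySem.Str.isIn k description) "ipo" "initial public offering" "grey market" 0
  have b1 := pvGroup_block (fun k => PySem.Str.isIn k description) "stock" "share" "equity" 1
  have b2 := pvGroup_block (fun k => PySem.Str.isIn k description) "news" "article" "headline" 2
  have b3 := pvGroup_block (fun k => PySem.Str.isIn k description) "product" "price" "ecommerce" 3
  simp only [] at b0 b1 b2 b3
  rw [show pvKeywordPriority =
        ([("ipo", 0), ("initial public offering", 0), ("grey market", 0)] : List (String × Nat))
        ++ [("stock", 1), ("share", 1), ("equity", 1)]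
        ++ [("news", 2), ("article", 2), ("headline", 2)]
        ++ [("product", 3), ("price", 3), ("ecommerce", 3)] from rfl,
      List.filterMap_append, List.filterMap_append, List.filterMap_append,
      pvMin_blocks _ _ _ _ b0.1 b1.1 b2.1 b3.1]
  cases hA0 : (["ipo", "initial public offering", "grey market"].any fun k => PySem.Str.isIn k description) <;>
  cases hA1 : (["stock", "share", "equity"].any fun k => PySem.Str.isIn k description) <;>
  cases hA2 : (["news", "article", "headline"].any fun k => PySem.Str.isIn k description) <;>
  cases hA3 : (["product", "price", "ecommerce"].any fun k => PySem.Str.isIn k description) <;>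
    simp only [ne_eq, b0.2, b1.2, b2.2, b3.2, hA0, hA1, hA2, hA3] <;>
    simp [pvOutcomes]

-- ===== VERDICT (by name: the statement is the Claim_ definition above) =====
theorem analyze_user_requirements_py_spec : Claim_equal_analyze_user_requirements_py := by
  intro form_data _
  unfold Spec_analyze_user_requirements_py analyze_user_requirements_py analyze_user_requirements_py_alt
  simp only []
  rw [pvSelect_eq]
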